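-- pv_equiv track=rewrite | github.com/JamalUcal/email-test-bot-jamal | src/scrapers/supplier_scrapers/apf_scraper.py | _find_parsing_config
-- ===== SOURCE A (Python) =====
-- from typing import List, Dict, Any, Optional, AsyncIterator, cast
--
-- def _find_parsing_config(
--     brand: str, scraper_configs: List[Dict[str, Any]]
-- ) -> bool:
--     """
--     Check if we have parsing config for this brand (with parent fallback).
--
--     Args:
--         brand: Brand name to check
--         scraper_configs: List of brand configs from scraper config
--
--     Returns:
--         True if parsing config exists for this brand or a parent brand
--     """
--     search_brand = brand
--
--     while search_brand:
--         for config in scraper_configs: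
--             if config.get('brand', '').upper() == search_brand.upper():
--                 return True
--
--         # Try parent brand (e.g., BMW_PART1 -> BMW)
--         last_sep = max(search_brand.rfind('_'), search_brand.rfind('-'))
--         if last_sep > 0:
--             search_brand = search_brand[:last_sep]
--         else:
--             break
--
--     return False
-- ===== SOURCE B (Python) =====
-- def _find_parsing_config(brand, scraper_configs):
--     """Single pass over scraper_configs: a config matches iff its brand is an
--     ancestor of `brand`, i.e. equal to it (case-insensitive) or a prefix of it
--     ending right before a '_'/'-' separator."""
--     if not brand:
--         return False
--     target = brand.upper()
--     for config in scraper_configs: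
--         c = config.get('brand', '').upper()
--         if c and (target == c or target.startswith(c + '_') or target.startswith(c + '-')):
--             return True
--     return False
-- ===== Notes on version B (the rewrite author's own statement) =====
-- stated objective: faster
-- what changed: Replaced the parent-stripping while-loop (which re-scans all scraper_configs for every stripped ancestor of brand) by a single pass over scraper_configs that recognizes each config brand as an ancestor via one separator-boundary prefix test against brand.upper().
import Mathlib
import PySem

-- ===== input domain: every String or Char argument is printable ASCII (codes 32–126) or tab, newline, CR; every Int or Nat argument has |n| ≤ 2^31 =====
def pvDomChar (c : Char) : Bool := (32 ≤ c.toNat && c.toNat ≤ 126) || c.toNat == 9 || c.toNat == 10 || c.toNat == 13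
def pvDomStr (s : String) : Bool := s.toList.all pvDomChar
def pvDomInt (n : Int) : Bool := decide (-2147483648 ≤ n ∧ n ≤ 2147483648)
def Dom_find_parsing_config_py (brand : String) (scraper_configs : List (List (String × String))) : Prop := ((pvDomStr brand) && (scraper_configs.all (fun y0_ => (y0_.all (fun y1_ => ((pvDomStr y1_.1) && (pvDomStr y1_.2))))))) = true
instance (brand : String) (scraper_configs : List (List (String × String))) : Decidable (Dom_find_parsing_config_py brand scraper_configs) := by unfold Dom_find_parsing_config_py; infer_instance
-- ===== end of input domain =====

-- B replaces A's parent-stripping while-loop by a single pass over scraper_configs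
-- that tests each config brand as a separator-boundary prefix of the brand (objective: faster single scan).


-- ===== PORT A =====
-- the 'while search_brand:' loop of A, one step per stripped parent; the fuel counter only
-- makes the recursion structural: it starts at len(brand)+1 and each step strictly shortens
-- the string (apf_go_lt below), so it never runs out
def find_parsing_config_py_loop (scraper_configs : List (List (String × String)))
    (fuel : Nat) (search_brand : String) : Bool :=
  match fuel with
  | 0 => false
  | fuel + 1 =>
    if search_brand.toList = [] then false
    else if scraper_configs.any (fun config =>
        PySem.Str.upper (PySem.Dict.getD (PySem.Dict.mk config) "brand" "") == PySem.Str.upper search_brand) then true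
    else
      let last_sep := max (PySem.Str.rfind search_brand "_") (PySem.Str.rfind search_brand "-")
      if 0 < last_sep then
        find_parsing_config_py_loop scraper_configs fuel (PySem.Str.slice search_brand none (some last_sep))
      else false

def find_parsing_config_py (brand : String) (scraper_configs : List (List (String × String))) : Bool :=
  find_parsing_config_py_loop scraper_configs (brand.toList.length + 1) brand

-- ===== PORT B =====
def find_parsing_config_py_alt (brand : String) (scraper_configs : List (List (String × String))) : Bool :=
  if brand.toList = [] then false
  else
    let target := PySem.Str.upper brand
    scraper_configs.any (fun config =>
      let c := PySem.Str.upper (PySem.Dict.getD (PySem.Dict.mk config) "brand" "")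
      (!c.toList.isEmpty) &&
        (target == c || PySem.Str.startswith target (c ++ "_") || PySem.Str.startswith target (c ++ "-")))

-- ===== PRECONDITION & SPEC =====
def Spec_find_parsing_config_py (brand : String) (scraper_configs : List (List (String × String))) (out : Bool) : Prop := out = find_parsing_config_py_alt brand scraper_configs
instance (brand : String) (scraper_configs : List (List (String × String))) (out : Bool) : Decidable (Spec_find_parsing_config_py brand scraper_configs out) := by unfold Spec_find_parsing_config_py; infer_instance

-- ===== CLAIM (what is proved, stated in full; the proofs are below) =====
def Claim_equal_find_parsing_config_py : Prop := ∀ (brand : String) (scraper_configs : List (List (String × String))), Dom_find_parsing_config_py brand scraper_configs → Spec_find_parsing_config_py brand scraper_configs (find_parsing_config_py brand scraper_configs)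

-- ===== LEMMAS AND PROOFS =====

-- rfind never returns an index ≥ len(s) for a nonempty needle
lemma apf_go_lt (s sub : List Char) (h : sub ≠ []) : ∀ k : Nat, PySem.Chars.rfind.go s sub k < (s.length : Int) := by
  intro k
  induction k with
  | zero =>
    rw [PySem.Chars.rfind.go]
    split
    · next hp =>
      have h1 := (List.isPrefixOf_iff_prefix.mp hp).length_le
      have h2 : 0 < sub.length := List.length_pos_of_ne_nil h
      exact_mod_cast Nat.lt_of_lt_of_le h2 h1
    · omega
  | succ j ih =>
    rw [PySem.Chars.rfind.go]
    split
    · next hp =>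
      have h1 := (List.isPrefixOf_iff_prefix.mp hp).length_le
      have h2 : 0 < sub.length := List.length_pos_of_ne_nil h
      have h3 : (List.drop (j+1) s).length = s.length - (j+1) := by simp
      have : j + 1 < s.length := by omega
      exact_mod_cast this
    · exact ih

lemma apf_go_prefix (s sub : List Char) : ∀ k : Nat, 0 ≤ PySem.Chars.rfind.go s sub k →
    sub <+: List.drop (PySem.Chars.rfind.go s sub k).toNat s := by
  intro k
  induction k with
  | zero =>
    rw [PySem.Chars.rfind.go]
    split
    · next hp => intro _; simpa using List.isPrefixOf_iff_prefix.mp hp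
    · intro h; omega
  | succ j ih =>
    rw [PySem.Chars.rfind.go]
    split
    · next hp => intro _; simpa using List.isPrefixOf_iff_prefix.mp hp
    · exact ih

lemma apf_go_ge (s sub : List Char) : ∀ k j : Nat, j ≤ k → sub <+: List.drop j s →
    (j : Int) ≤ PySem.Chars.rfind.go s sub k := by
  intro k
  induction k with
  | zero =>
    intro j hj hp
    interval_cases j
    rw [PySem.Chars.rfind.go]
    rw [if_pos (List.isPrefixOf_iff_prefix.mpr (by simpa using hp))]
    omega
  | succ k ih =>
    intro j hj hp
    rw [PySem.Chars.rfind.go]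
    split
    · next h => exact_mod_cast Int.ofNat_le.mpr hj
    · next h =>
      rcases Nat.lt_or_ge j (k+1) with hlt | hge
      · exact ih j (by omega) hp
      · exfalso
        have : j = k + 1 := by omega
        subst this
        exact h (List.isPrefixOf_iff_prefix.mpr hp)

lemma apf_single_prefix (s : List Char) (ch : Char) (j : Nat) :
    [ch] <+: List.drop j s ↔ s[j]? = some ch := by
  rw [← List.head?_drop]
  cases List.drop j s with
  | nil => simp
  | cons a t => simp [List.cons_prefix_iff, eq_comm]

def ApfAnc (c u : List Char) : Prop := c = u ∨ c ++ ['_'] <+: u ∨ c ++ ['-'] <+: u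

def ApfL (s : List Char) : Int := max (PySem.Chars.rfind s ['_']) (PySem.Chars.rfind s ['-'])

lemma apf_L_lt (s : List Char) : ApfL s < (s.length : Int) := by
  unfold ApfL PySem.Chars.rfind
  exact max_lt (apf_go_lt s ['_'] (by simp) s.length) (apf_go_lt s ['-'] (by simp) s.length)

lemma apf_L_sep (s : List Char) (h : 0 ≤ ApfL s) :
    s[(ApfL s).toNat]? = some '_' ∨ s[(ApfL s).toNat]? = some '-' := by
  unfold ApfL at *
  rcases max_choice (PySem.Chars.rfind s ['_']) (PySem.Chars.rfind s ['-']) with he | he <;>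
    rw [he] at h ⊢ <;> unfold PySem.Chars.rfind at *
  · exact Or.inl ((apf_single_prefix _ _ _).mp (apf_go_prefix s ['_'] s.length h))
  · exact Or.inr ((apf_single_prefix _ _ _).mp (apf_go_prefix s ['-'] s.length h))

lemma apf_L_ge (s : List Char) (j : Nat) (ch : Char) (hch : ch = '_' ∨ ch = '-')
    (h : s[j]? = some ch) : (j : Int) ≤ ApfL s := by
  have hj : j < s.length := by
    by_contra hge
    rw [List.getElem?_eq_none (by omega)] at h
    simp at h
  have hp := (apf_single_prefix s ch j).mpr h
  unfold ApfL PySem.Chars.rfind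
  rcases hch with rfl | rfl
  · exact le_max_of_le_left (apf_go_ge s ['_'] s.length j (by omega) hp)
  · exact le_max_of_le_right (apf_go_ge s ['-'] s.length j (by omega) hp)

lemma apf_upperChar_sep (c ch : Char) (hch : ch = '_' ∨ ch = '-') :
    PySem.Chars.upperChar c = ch ↔ c = ch := by
  unfold PySem.Chars.upperChar PySem.Chars.islower
  split
  · next h =>
    simp only [Bool.and_eq_true, decide_eq_true_eq] at h
    have h1 : 97 ≤ c.toNat := h.1
    have h2 : c.toNat ≤ 122 := h.2
    constructor
    · intro he
      exfalso
      have hv : (c.toNat - 32).isValidChar := by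
        unfold Nat.isValidChar; left; omega
      have := congrArg Char.toNat he
      rw [Char.toNat_ofNat, if_pos hv] at this
      rcases hch with rfl | rfl
      · rw [(by decide : ('_').toNat = 95)] at this; omega
      · rw [(by decide : ('-').toNat = 45)] at this; omega
    · intro he
      exfalso
      rcases hch with rfl | rfl <;> subst he
      · rw [(by decide : ('_').toNat = 95)] at h1; omega
      · rw [(by decide : ('-').toNat = 45)] at h1; omega
  · exact Iff.rfl

lemma apf_upper_get_sep (s : List Char) (j : Nat) (ch : Char) (hch : ch = '_' ∨ ch = '-') :
    (PySem.Chars.upper s)[j]? = some ch ↔ s[j]? = some ch := by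
  unfold PySem.Chars.upper
  rw [List.getElem?_map]
  cases hg : s[j]? with
  | none => simp
  | some a => simp [apf_upperChar_sep a ch hch]

lemma apf_snoc_prefix (c u : List Char) (x : Char) :
    c ++ [x] <+: u ↔ c <+: u ∧ u[c.length]? = some x := by
  constructor
  · rintro ⟨t, rfl⟩
    refine ⟨⟨[x] ++ t, by simp⟩, ?_⟩
    rw [List.append_assoc]
    rw [List.getElem?_append_right (by omega)]
    simp
  · rintro ⟨⟨t, rfl⟩, hx⟩
    rw [List.getElem?_append_right (by omega)] at hx
    simp only [Nat.sub_self] at hx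
    cases t with
    | nil => simp at hx
    | cons b t' =>
      simp only [List.getElem?_cons_zero, Option.some.injEq] at hx
      subst hx
      exact ⟨t', by simp⟩

lemma apf_step (s c : List Char) (hs : s ≠ []) :
    (c ≠ [] ∧ ApfAnc c (PySem.Chars.upper s)) ↔
      (c = PySem.Chars.upper s ∨
        (0 < ApfL s ∧ (c ≠ [] ∧ ApfAnc c (PySem.Chars.upper (List.take (ApfL s).toNat s))))) := by
  have hulen : (PySem.Chars.upper s).length = s.length := by simp [PySem.Chars.upper]
  have hutake : ∀ n : Nat, PySem.Chars.upper (List.take n s) = List.take n (PySem.Chars.upper s) := by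
    intro n; simp [PySem.Chars.upper, List.map_take]
  have hLlt := apf_L_lt s
  have hslen : 0 < s.length := List.length_pos_of_ne_nil hs
  constructor
  · rintro ⟨hc, hanc⟩
    rcases hanc with rfl | hpre | hpre
    · exact Or.inl rfl
    all_goals {
      first
      | (have hsep : (PySem.Chars.upper s)[c.length]? = some '_' ∧ True := ⟨((apf_snoc_prefix _ _ _).mp hpre).2, trivial⟩
         have hch : ('_' : Char) = '_' ∨ ('_' : Char) = '-' := Or.inl rfl
         have hg := (apf_upper_get_sep s c.length '_' hch).mp hsep.1)
      | (have hsep : (PySem.Chars.upper s)[c.length]? = some '-' ∧ True := ⟨((apf_snoc_prefix _ _ _).mp hpre).2, trivial⟩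
         have hch : ('-' : Char) = '_' ∨ ('-' : Char) = '-' := Or.inr rfl
         have hg := (apf_upper_get_sep s c.length '-' hch).mp hsep.1)
      -- common continuation
      all_goals {
        have hcp := ((apf_snoc_prefix _ _ _).mp hpre).1
        have hle : (c.length : Int) ≤ ApfL s := apf_L_ge s c.length _ hch hg
        have hcpos : 0 < c.length := List.length_pos_of_ne_nil hc
        have hLpos : 0 < ApfL s := lt_of_lt_of_le (by exact_mod_cast hcpos) hle
        refine Or.inr ⟨hLpos, hc, ?_⟩
        rw [hutake]
        rcases Nat.lt_or_ge c.length (ApfL s).toNat with hlt | hge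
        · refine Or.inr ?_
          first
          | exact Or.inl (List.prefix_take_iff.mpr ⟨hpre, by simp; omega⟩)
          | exact Or.inr (List.prefix_take_iff.mpr ⟨hpre, by simp; omega⟩)
        · have hceq : c.length = (ApfL s).toNat := by omega
          refine Or.inl ?_
          have := List.prefix_take_iff.mpr (⟨hcp, le_of_eq hceq⟩ : c <+: PySem.Chars.upper s ∧ c.length ≤ (ApfL s).toNat)
          have hlen2 : (List.take (ApfL s).toNat (PySem.Chars.upper s)).length = (ApfL s).toNat := by
            simp; omega
          exact List.IsPrefix.eq_of_length this (by rw [hlen2, hceq])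
      }
    }
  · rintro (rfl | ⟨hL, hc, hanc⟩)
    · refine ⟨by simpa [PySem.Chars.upper] using hs, Or.inl rfl⟩
    · have hL0 : (0:Int) ≤ ApfL s := le_of_lt hL
      have hLn : (ApfL s).toNat < s.length := by omega
      have hLpos : 0 < (ApfL s).toNat := by omega
      rcases hanc with rfl | hpre | hpre
      · -- c is the take-prefix itself: extend by the separator at position L
        rcases apf_L_sep s hL0 with hsep | hsep
        · refine ⟨hc, Or.inr (Or.inl ?_)⟩
          rw [apf_snoc_prefix]
          constructor
          · rw [hutake]; exact List.take_prefix _ _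
          · rw [hutake]
            have : (List.take (ApfL s).toNat (PySem.Chars.upper s)).length = (ApfL s).toNat := by simp; omega
            rw [this]
            exact (apf_upper_get_sep s _ '_' (Or.inl rfl)).mpr hsep
        · refine ⟨hc, Or.inr (Or.inr ?_)⟩
          rw [apf_snoc_prefix]
          constructor
          · rw [hutake]; exact List.take_prefix _ _
          · rw [hutake]
            have : (List.take (ApfL s).toNat (PySem.Chars.upper s)).length = (ApfL s).toNat := by simp; omega
            rw [this]
            exact (apf_upper_get_sep s _ '-' (Or.inr rfl)).mpr hsep
      · rw [hutake] at hpre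
        exact ⟨hc, Or.inr (Or.inl (hpre.trans (List.take_prefix _ _)))⟩
      · rw [hutake] at hpre
        exact ⟨hc, Or.inr (Or.inr (hpre.trans (List.take_prefix _ _)))⟩

lemma apf_rfind_L (s : String) :
    max (PySem.Str.rfind s "_") (PySem.Str.rfind s "-") = ApfL s.toList := by
  unfold ApfL
  rw [PySem.Str.rfind_eq, PySem.Str.rfind_eq,
    (by decide : ("_" : String).toList = ['_']), (by decide : ("-" : String).toList = ['-'])]

lemma apf_upper_toList (t : String) :
    (PySem.Str.upper t).toList = t.toList.map PySem.Chars.upperChar := by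
  rw [PySem.Str.toList_upper]; rfl

-- characterization of A's while loop, for any sufficient fuel
lemma apf_loop_iff (scraper_configs : List (List (String × String))) :
    ∀ (fuel : Nat) (s : String), s.toList.length < fuel →
      (find_parsing_config_py_loop scraper_configs fuel s = true ↔
        (s.toList ≠ [] ∧ ∃ cfg ∈ scraper_configs,
          ((PySem.Dict.getD (PySem.Dict.mk cfg) "brand" "").toList.map PySem.Chars.upperChar ≠ [] ∧
            ApfAnc ((PySem.Dict.getD (PySem.Dict.mk cfg) "brand" "").toList.map PySem.Chars.upperChar)
              (PySem.Chars.upper s.toList)))) := by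
  intro fuel
  induction fuel with
  | zero => intro s h; omega
  | succ fuel ih =>
  intro s hfuel
  rw [find_parsing_config_py_loop]
  by_cases hemp : s.toList = []
  · simp [hemp, ApfAnc]
  rw [if_neg hemp]
  by_cases hmatch : (scraper_configs.any (fun config =>
      PySem.Str.upper (PySem.Dict.getD (PySem.Dict.mk config) "brand" "") == PySem.Str.upper s)) = true
  · rw [if_pos hmatch]
    simp only [List.any_eq_true, beq_iff_eq] at hmatch
    obtain ⟨cfg, hmem, heq⟩ := hmatch
    have hceq : (PySem.Dict.getD (PySem.Dict.mk cfg) "brand" "").toList.map PySem.Chars.upperChar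
        = PySem.Chars.upper s.toList := by
      rw [← apf_upper_toList, heq, PySem.Str.toList_upper]
    simp only [true_iff]
    refine ⟨hemp, cfg, hmem, ?_, Or.inl hceq⟩
    rw [hceq]
    simpa [PySem.Chars.upper] using hemp
  · rw [if_neg hmatch]
    simp only [List.any_eq_true, beq_iff_eq, not_exists, not_and] at hmatch
    have hne : ∀ cfg ∈ scraper_configs,
        (PySem.Dict.getD (PySem.Dict.mk cfg) "brand" "").toList.map PySem.Chars.upperChar
          ≠ PySem.Chars.upper s.toList := by
      intro cfg hmem hcontra
      apply hmatch cfg hmem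
      apply String.ext_iff.mpr
      rw [apf_upper_toList, hcontra, PySem.Str.toList_upper]
    by_cases hpos : 0 < max (PySem.Str.rfind s "_") (PySem.Str.rfind s "-")
    · rw [if_pos hpos]
      have hLpos : 0 < ApfL s.toList := by rw [← apf_rfind_L]; exact hpos
      have hLlt := apf_L_lt s.toList
      have hslen : 0 < s.toList.length := List.length_pos_of_ne_nil hemp
      have hslice : (PySem.Str.slice s none
            (some (max (PySem.Str.rfind s "_") (PySem.Str.rfind s "-")))).toList
          = List.take (ApfL s.toList).toNat s.toList := by
        simp only [PySem.Str.toList_slice, PySem.Chars.slice_eq_listSlice]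
        rw [PySem.List.slice_to s.toList (le_of_lt hpos), apf_rfind_L]
      have hlen_take : (List.take (ApfL s.toList).toNat s.toList).length = (ApfL s.toList).toNat := by
        simp only [List.length_take]
        omega
      have htne : List.take (ApfL s.toList).toNat s.toList ≠ [] := by
        intro hcon
        have := congrArg List.length hcon
        rw [hlen_take] at this
        simp at this
        omega
      rw [ih (PySem.Str.slice s none
          (some (max (PySem.Str.rfind s "_") (PySem.Str.rfind s "-"))))
          (by rw [hslice, hlen_take]; omega)]
      rw [hslice]
      constructor
      · rintro ⟨_, cfg, hmem, hP⟩
        exact ⟨hemp, cfg, hmem, (apf_step s.toList _ hemp).mpr (Or.inr ⟨hLpos, hP⟩)⟩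
      · rintro ⟨_, cfg, hmem, hP⟩
        rcases (apf_step s.toList _ hemp).mp hP with hcu | ⟨_, hP'⟩
        · exact absurd hcu (hne cfg hmem)
        · exact ⟨htne, cfg, hmem, hP'⟩
    · rw [if_neg hpos]
      simp only [Bool.false_eq_true, false_iff]
      rintro ⟨_, cfg, hmem, hcne, hanc⟩
      rcases (apf_step s.toList _ hemp).mp ⟨hcne, hanc⟩ with hcu | ⟨hLpos, _⟩
      · exact absurd hcu (hne cfg hmem)
      · rw [← apf_rfind_L] at hLpos
        exact hpos hLpos

lemma apf_alt_iff (brand : String) (scraper_configs : List (List (String × String))) :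
    find_parsing_config_py_alt brand scraper_configs = true ↔
      (brand.toList ≠ [] ∧ ∃ cfg ∈ scraper_configs,
        ((PySem.Dict.getD (PySem.Dict.mk cfg) "brand" "").toList.map PySem.Chars.upperChar ≠ [] ∧
          ApfAnc ((PySem.Dict.getD (PySem.Dict.mk cfg) "brand" "").toList.map PySem.Chars.upperChar)
            (PySem.Chars.upper brand.toList))) := by
  unfold find_parsing_config_py_alt
  by_cases hemp : brand.toList = []
  · simp [hemp]
  rw [if_neg hemp]
  simp only [List.any_eq_true, Bool.and_eq_true, Bool.or_eq_true, Bool.not_eq_eq_eq_not,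
    Bool.not_true, List.isEmpty_eq_false_iff, beq_iff_eq]
  constructor
  · rintro ⟨cfg, hmem, hcne, hor⟩
    refine ⟨hemp, cfg, hmem, by rw [← apf_upper_toList]; exact hcne, ?_⟩
    rcases hor with (heq | hsw) | hsw
    · exact Or.inl (by rw [← apf_upper_toList, ← heq, PySem.Str.toList_upper])
    · refine Or.inr (Or.inl ?_)
      have := (PySem.Chars.startswith_iff _ _).mp (by rw [← PySem.Str.startswith_eq]; exact hsw)
      rw [String.toList_append, (by decide : ("_" : String).toList = ['_']), apf_upper_toList] at this
      rw [PySem.Str.toList_upper] at this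
      exact this
    · refine Or.inr (Or.inr ?_)
      have := (PySem.Chars.startswith_iff _ _).mp (by rw [← PySem.Str.startswith_eq]; exact hsw)
      rw [String.toList_append, (by decide : ("-" : String).toList = ['-']), apf_upper_toList] at this
      rw [PySem.Str.toList_upper] at this
      exact this
  · rintro ⟨_, cfg, hmem, hcne, hanc⟩
    refine ⟨cfg, hmem, by rw [apf_upper_toList]; exact hcne, ?_⟩
    rcases hanc with heq | hpre | hpre
    · refine Or.inl (Or.inl (String.ext_iff.mpr ?_))
      simp only [PySem.Str.toList_upper, PySem.Chars.upper]
      exact heq.symm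
    · refine Or.inl (Or.inr ?_)
      rw [PySem.Str.startswith_eq]
      apply (PySem.Chars.startswith_iff _ _).mpr
      rw [String.toList_append, (by decide : ("_" : String).toList = ['_']), apf_upper_toList,
        PySem.Str.toList_upper]
      exact hpre
    · refine Or.inr ?_
      rw [PySem.Str.startswith_eq]
      apply (PySem.Chars.startswith_iff _ _).mpr
      rw [String.toList_append, (by decide : ("-" : String).toList = ['-']), apf_upper_toList,
        PySem.Str.toList_upper]
      exact hpre


-- ===== VERDICT (by name: the statement is the Claim_ definition above) =====
theorem find_parsing_config_py_spec : Claim_equal_find_parsing_config_py := by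
  intro brand scraper_configs _
  unfold Spec_find_parsing_config_py find_parsing_config_py
  rw [Bool.eq_iff_iff, apf_loop_iff scraper_configs (brand.toList.length + 1) brand (by omega),
    apf_alt_iff]
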